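-- pv_equiv track=rewrite | github.com/GameRuiner/Uniwersytet | I semestr/Python/Lista13/L11Z5 (1).py | ppn
-- ===== SOURCE A (Python) =====
-- def ppn(word):
--     chars = {}
--     c = 1
--     word = word.lower()
--     f = word[0]
--     result='1'
--     chars[f] = c
--     word = word[1:]
--     for i in word:
--         if i in chars:
--             result +='-'+str(chars[i])
--         else:
--             c+=1
--             chars[i] = c
--             result += '-'+str(chars[i])
--     return result
-- ===== SOURCE B (Python) =====
-- def ppn(word):
--     w = word.lower()
--     return '-'.join(str(len(set(w[:w.index(c) + 1]))) for c in w)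
-- ===== Notes on version B (the rewrite author's own statement) =====
-- stated objective: alternative
-- what changed: A incrementally assigns ranks with a mutated dict and counter in one fused loop; B keeps no state at all and computes each character's rank directly as the count of distinct characters in the prefix ending at its first occurrence (len(set(w[:w.index(c)+1]))), joining the results; B trades A's O(n) incremental bookkeeping for a stateless quadratic formula.
import Mathlib
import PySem

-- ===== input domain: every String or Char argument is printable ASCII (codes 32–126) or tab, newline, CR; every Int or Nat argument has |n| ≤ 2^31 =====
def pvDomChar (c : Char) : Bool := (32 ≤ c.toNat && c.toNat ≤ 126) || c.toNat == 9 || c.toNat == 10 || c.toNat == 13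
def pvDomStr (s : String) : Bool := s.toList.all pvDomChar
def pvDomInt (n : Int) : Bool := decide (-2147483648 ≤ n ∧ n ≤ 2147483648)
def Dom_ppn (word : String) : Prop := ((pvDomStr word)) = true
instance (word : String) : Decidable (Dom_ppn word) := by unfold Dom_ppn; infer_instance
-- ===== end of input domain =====

-- B drops A's dict/counter state entirely and computes each character's rank as the number of
-- distinct characters in the prefix ending at its first occurrence; objective: alternative
-- (stateless quadratic formula vs A's incremental bookkeeping). A raises IndexError on the
-- empty word (excluded by Pre_); B returns "" there.

-- ===== PORT A =====
-- the for-loop of A over the remaining characters; state = (chars, c, result)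
def ppnLoopA : List Char → PySem.Dict Char Int → Int → List Char → List Char
  | [], _, _, result => result
  | i :: rest, chars, c, result =>
    match chars.get? i with
    | some v => ppnLoopA rest chars c (result ++ '-' :: PySem.Int.toChars v)
    | none =>
      let c' := c + 1
      let chars' := chars.insert i c'
      -- Python then reads chars[i] back; the key was just inserted, so getD is exact here
      ppnLoopA rest chars' c' (result ++ '-' :: PySem.Int.toChars (chars'.getD i 0))

def ppn (word : String) : String :=
  let w := (PySem.Str.lower word).toList
  match w with
  | [] => ""   -- word[0] raises IndexError in Python: excluded by Pre_ppn
  | f :: rest => String.ofList (ppnLoopA rest (PySem.Dict.empty.insert f 1) 1 ['1'])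

-- ===== PORT B =====
def ppn_alt (word : String) : String :=
  let w := (PySem.Str.lower word).toList
  -- '-'.join(str(len(set(w[:w.index(c) + 1]))) for c in w)
  -- w.index(c) always succeeds (c is drawn from w), so getD's default is never used;
  -- w[:k+1] with k ≥ 0 is exactly List.take (k+1); set(…) is PySem.List.dedup
  String.ofList (PySem.Chars.join ['-'] (w.map (fun c =>
    (PySem.Int.toStr ((PySem.List.dedup (w.take (((PySem.List.index? w c).getD 0) + 1))).length : Int)).toList)))

-- ===== PRECONDITION & SPEC =====
-- Pre_ excludes only the empty word, on which A raises IndexError (it reads word[0]).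
def Pre_ppn (word : String) : Prop := word.toList ≠ []
instance (word : String) : Decidable (Pre_ppn word) := by unfold Pre_ppn; infer_instance
def pvWitness_ppn : String := "Dromader"

def Spec_ppn (word : String) (out : String) : Prop := out = ppn_alt word
instance (word : String) (out : String) : Decidable (Spec_ppn word out) := by unfold Spec_ppn; infer_instance

-- ===== CLAIM (what is proved, stated in full; the proofs are below) =====
def Claim_equal_ppn : Prop := ∀ (word : String), Dom_ppn word → Pre_ppn word → Spec_ppn word (ppn word)

-- ===== LEMMAS AND PROOFS =====

-- reference emission: what A's loop appends, phrased over the list `seen` of distinct chars met so far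
def ppnEmit : List Char → List Char → List Char
  | [], _ => []
  | i :: xs, seen =>
    if i ∈ seen then ('-' :: PySem.Int.toChars ((seen.idxOf i : Int) + 1)) ++ ppnEmit xs seen
    else ('-' :: PySem.Int.toChars ((seen.length : Int) + 1)) ++ ppnEmit xs (seen ++ [i])

-- A's loop, abstracted: the dict holds exactly the 1-based ranks of `seen`
theorem ppnLoopA_eq (xs : List Char) :
    ∀ (seen : List Char) (chars : PySem.Dict Char Int) (result : List Char),
    seen.Nodup →
    (∀ ch, chars.get? ch = if ch ∈ seen then some ((seen.idxOf ch : Int) + 1) else none) →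
    ppnLoopA xs chars (seen.length : Int) result = result ++ ppnEmit xs seen := by
  induction xs with
  | nil => intro seen chars result _ _; simp [ppnLoopA, ppnEmit]
  | cons i xs ih =>
    intro seen chars result hnd hchars
    rw [ppnLoopA, ppnEmit]
    by_cases hm : i ∈ seen
    · rw [hchars i, if_pos hm, if_pos hm]
      simp only
      rw [ih seen chars _ hnd hchars, List.append_assoc]
    · rw [hchars i, if_neg hm, if_neg hm]
      simp only
      have hgetD : ((chars.insert i ((seen.length : Int) + 1)).getD i 0) = (seen.length : Int) + 1 :=
        PySem.Dict.getD_insert_self _ _ _ _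
      rw [hgetD]
      have hnd' : (seen ++ [i]).Nodup := by
        simp [List.nodup_append, hnd]
        intro a ha hai; exact hm (hai ▸ ha)
      have hlen : (seen.length : Int) + 1 = ((seen ++ [i]).length : Int) := by
        simp
      have hidxi : (seen ++ [i]).idxOf i = seen.length := by
        rw [List.idxOf_append_of_notMem hm]
        simp [List.idxOf_cons_self]
      have hch' : ∀ ch, (chars.insert i ((seen.length : Int) + 1)).get? ch =
          if ch ∈ seen ++ [i] then some (((seen ++ [i]).idxOf ch : Int) + 1) else none := by
        intro ch
        by_cases hci : ch = i
        · subst hci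
          rw [PySem.Dict.get?_insert_self, if_pos (by simp), hidxi]
        · rw [PySem.Dict.get?_insert_of_ne _ _ hci, hchars ch]
          by_cases hcs : ch ∈ seen
          · rw [if_pos hcs, if_pos (by simp [hcs]), List.idxOf_append_of_mem hcs]
          · rw [if_neg hcs, if_neg (by simp [hcs, hci])]
      rw [hlen, ih (seen ++ [i]) _ _ hnd' (hlen ▸ hch'), List.append_assoc]

theorem index?_of_mem (l : List Char) (x : Char) (h : x ∈ l) :
    PySem.List.index? l x = some (l.idxOf x) := by
  rw [PySem.List.index?_eq_idxOf?, List.idxOf_eq_getD_idxOf?]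
  obtain ⟨k, hk⟩ := Option.isSome_iff_exists.mp (List.isSome_idxOf?.mpr h)
  simp [hk]

theorem dedup_append_prefix (p ys : List Char) :
    ∃ t, PySem.List.dedup (p ++ ys) = PySem.List.dedup p ++ t := by
  simp only [PySem.List.dedup_eq_ofList, PySem.Set.ofList_append,
    PySem.Set.update_eq_append_filter]
  exact ⟨_, rfl⟩

theorem dedup_append_singleton_mem (p : List Char) (i : Char) (h : i ∈ PySem.List.dedup p) :
    PySem.List.dedup (p ++ [i]) = PySem.List.dedup p := by
  simp only [PySem.List.dedup_eq_ofList, PySem.Set.ofList_append_singleton, PySem.Set.add]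
  rw [if_pos (by simp [PySem.Set.contains_eq_listContains]; simpa using h)]

theorem dedup_append_singleton_notMem (p : List Char) (i : Char) (h : i ∉ PySem.List.dedup p) :
    PySem.List.dedup (p ++ [i]) = PySem.List.dedup p ++ [i] := by
  simp only [PySem.List.dedup_eq_ofList, PySem.Set.ofList_append_singleton, PySem.Set.add]
  rw [if_neg (by simp [PySem.Set.contains_eq_listContains]; simpa using h)]

-- the incremental emission equals the first-occurrence rank in the dedup of the WHOLE word
theorem ppnEmit_eq (xs : List Char) :
    ∀ (p : List Char),
    ppnEmit xs (PySem.List.dedup p) =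
      xs.flatMap (fun ch => '-' :: PySem.Int.toChars (((PySem.List.dedup (p ++ xs)).idxOf ch : Int) + 1)) := by
  induction xs with
  | nil => intro p; simp [ppnEmit]
  | cons i xs ih =>
    intro p
    rw [ppnEmit, List.flatMap_cons]
    have hassoc : p ++ i :: xs = (p ++ [i]) ++ xs := by simp
    by_cases hm : i ∈ PySem.List.dedup p
    · rw [if_pos hm]
      have hd : PySem.List.dedup (p ++ [i]) = PySem.List.dedup p := dedup_append_singleton_mem p i hm
      have hIH := ih (p ++ [i])
      rw [hd] at hIH
      rw [hIH, ← hassoc]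
      obtain ⟨t, ht⟩ := dedup_append_prefix p (i :: xs)
      rw [ht, List.idxOf_append_of_mem hm]
    · rw [if_neg hm]
      have hd : PySem.List.dedup (p ++ [i]) = PySem.List.dedup p ++ [i] :=
        dedup_append_singleton_notMem p i hm
      have hIH := ih (p ++ [i])
      rw [hd] at hIH
      rw [hIH, ← hassoc]
      obtain ⟨t, ht⟩ := dedup_append_prefix (p ++ [i]) xs
      rw [hd] at ht
      rw [hassoc, ht, List.append_assoc (PySem.List.dedup p) [i] t,
        List.idxOf_append_of_notMem hm]
      simp [List.idxOf_cons_self]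

-- B's stateless rank: the distinct-prefix count up to the first occurrence of c
-- equals c's 1-based position in the dedup of the whole word
theorem rank_eq (w : List Char) (c : Char) (h : c ∈ w) :
    ((PySem.List.dedup (w.take (((PySem.List.index? w c).getD 0) + 1))).length : Int) =
      ((PySem.List.dedup w).idxOf c : Int) + 1 := by
  rw [index?_of_mem w c h]
  simp only [Option.getD_some]
  set j := w.idxOf c with hj
  have hjlt : j < w.length := List.idxOf_lt_length_of_mem h
  have hget : w[j] = c := List.getElem_idxOf hjlt
  have hnmem : c ∉ w.take j := by
    intro hc
    rw [List.mem_take_iff_idxOf_lt h] at hc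
    omega
  have htake : w.take (j + 1) = w.take j ++ [c] := by
    rw [List.take_add_one]
    simp [List.getElem?_eq_getElem hjlt, hget]
  have hnd : c ∉ PySem.List.dedup (w.take j) := fun hc =>
    hnmem ((PySem.List.mem_dedup _ _).mp hc)
  have hdt : PySem.List.dedup (w.take (j + 1)) = PySem.List.dedup (w.take j) ++ [c] := by
    rw [htake]; exact dedup_append_singleton_notMem _ _ hnd
  have hw : w = w.take (j + 1) ++ w.drop (j + 1) := (List.take_append_drop _ _).symm
  obtain ⟨t, ht⟩ := dedup_append_prefix (w.take (j + 1)) (w.drop (j + 1))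
  rw [← hw] at ht
  have hidx : (PySem.List.dedup w).idxOf c = (PySem.List.dedup (w.take j)).length := by
    rw [ht, hdt, List.append_assoc, List.idxOf_append_of_notMem hnd]
    simp [List.idxOf_cons_self]
  rw [hidx, hdt]
  simp

-- '-'.join over a nonempty list of pieces, as a flatMap after the head
theorem join_dash (g : Char → List Char) (x : Char) (l : List Char) :
    PySem.Chars.join ['-'] ((x :: l).map g) = g x ++ l.flatMap (fun c => '-' :: g c) := by
  induction l generalizing x with
  | nil => simp [PySem.Chars.join_singleton]
  | cons b l ih =>
    rw [List.map_cons, List.map_cons, PySem.Chars.join_cons_cons, ← List.map_cons,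
      ih b, List.flatMap_cons]
    simp

theorem ppn_eq_alt (word : String) (hpre : word.toList ≠ []) : ppn word = ppn_alt word := by
  unfold ppn ppn_alt
  simp only [PySem.Str.toList_lower]
  cases hw : PySem.Chars.lower word.toList with
  | nil => exact absurd (List.map_eq_nil_iff.mp hw) hpre
  | cons f rest =>
    simp only
    -- B's per-character rank, via rank_eq
    have hrank : ∀ ch ∈ f :: rest,
        ((PySem.List.dedup ((f :: rest).take
            (((PySem.List.index? (f :: rest) ch).getD 0) + 1))).length : Int) =
          (((PySem.List.dedup (f :: rest)).idxOf ch : Int) + 1) :=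
      fun ch hch => rank_eq (f :: rest) ch hch
    -- A side
    have hA : ppnLoopA rest (PySem.Dict.empty.insert f 1) 1 ['1'] =
        ['1'] ++ ppnEmit rest [f] := by
      have := ppnLoopA_eq rest [f] (PySem.Dict.empty.insert f 1) ['1']
        (List.nodup_singleton f)
        (fun ch => by
          by_cases h : ch = f
          · subst h; rw [PySem.Dict.get?_insert_self]; simp [List.idxOf_cons_self]
          · rw [PySem.Dict.get?_insert_of_ne _ _ h, PySem.Dict.get?_empty,
              if_neg (by simp [h])])
      simpa using this
    have hfdedup : PySem.List.dedup [f] = [f] := by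
      rw [PySem.List.dedup_eq_ofList]
      exact PySem.Set.ofList_eq_self_of_nodup _ (List.nodup_singleton f)
    have hemit : ppnEmit rest [f] =
        rest.flatMap (fun ch => '-' :: PySem.Int.toChars
          (((PySem.List.dedup (f :: rest)).idxOf ch : Int) + 1)) := by
      have := ppnEmit_eq rest [f]
      rw [hfdedup] at this
      simpa using this
    -- B side, down to char lists
    apply String.toList_inj.mp
    rw [String.toList_ofList, String.toList_ofList]
    have hjoin := join_dash (fun c => (PySem.Int.toStr
        ((PySem.List.dedup ((f :: rest).take
          (((PySem.List.index? (f :: rest) c).getD 0) + 1))).length : Int)).toList) f rest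
    rw [hjoin]
    -- the head char always gets rank 1
    have hidxf : (PySem.List.dedup (f :: rest)).idxOf f = 0 := by
      rw [PySem.List.dedup_eq_ofList, PySem.Set.ofList_cons, List.idxOf_cons_self]
    have hhead : (PySem.Int.toStr
        ((PySem.List.dedup ((f :: rest).take
          (((PySem.List.index? (f :: rest) f).getD 0) + 1))).length : Int)).toList = ['1'] := by
      rw [PySem.Int.toList_toStr, hrank f (by simp), hidxf]
      rfl
    rw [hA, hemit, hhead]
    congr 1
    apply List.flatMap_congr
    intro ch hch
    rw [PySem.Int.toList_toStr, hrank ch (by simp [hch])]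

-- ===== VERDICT (by name: the statement is the Claim_ definition above) =====
theorem ppn_spec : Claim_equal_ppn := by
  intro word _ hpre
  show ppn word = ppn_alt word
  exact ppn_eq_alt word hpre
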